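-- pv_equiv track=rewrite | github.com/zackees/pio-compiler | src/pio_compiler/cache_manager.py | _looks_like_fingerprint_format
-- ===== SOURCE A (Python) =====
-- def _looks_like_fingerprint_format(dir_name: str) -> bool:
--     """Check if a directory name looks like the new platform-fingerprint format."""
--     parts = dir_name.split("-")
--     if len(parts) != 2:
--         return False
--
--     platform, fingerprint = parts
--     # Fingerprint should be 8 hex characters
--     return len(fingerprint) == 8 and all(
--         c in "0123456789abcdef" for c in fingerprint.lower()
--     )
-- ===== SOURCE B (Python) =====
-- def _looks_like_fingerprint_format(dir_name: str) -> bool: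
--     """Positional check: a dash at position len-9, none before it, 8 hex chars after."""
--     n = len(dir_name)
--     return (
--         n >= 9
--         and dir_name[n - 9] == "-"
--         and "-" not in dir_name[: n - 9]
--         and all(c in "0123456789abcdef" for c in dir_name[n - 8:].lower())
--     )
-- ===== Notes on version B (the rewrite author's own statement) =====
-- stated objective: simpler
-- what changed: Replaces the split/length-check/tuple-unpack with a direct positional test: a dash at index len-9, no dash before it, and 8 hex characters after it, checked on slices of the original string.
import Mathlib
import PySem

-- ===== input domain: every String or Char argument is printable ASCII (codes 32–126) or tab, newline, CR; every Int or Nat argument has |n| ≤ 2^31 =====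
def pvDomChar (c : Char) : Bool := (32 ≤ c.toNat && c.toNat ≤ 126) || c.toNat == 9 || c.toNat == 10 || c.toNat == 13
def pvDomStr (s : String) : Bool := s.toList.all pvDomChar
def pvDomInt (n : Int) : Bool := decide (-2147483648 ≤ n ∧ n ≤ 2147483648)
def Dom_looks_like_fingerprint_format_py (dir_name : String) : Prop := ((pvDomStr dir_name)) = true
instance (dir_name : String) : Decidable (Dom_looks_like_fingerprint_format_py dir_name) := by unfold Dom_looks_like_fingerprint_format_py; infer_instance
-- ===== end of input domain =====

-- B replaces A's split/unpack with a positional check (dash at len-9, none before it, 8 hex chars after); objective: simpler. Equally fast in practice.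

-- ===== PORT A =====
def looks_like_fingerprint_format_py (dir_name : String) : Bool :=
  let parts := PySem.Chars.splitOn dir_name.toList ['-']
  if parts.length ≠ 2 then false
  else
    match parts with
    | [_platform, fingerprint] =>
        fingerprint.length == 8 &&
          (PySem.Chars.lower fingerprint).all
            (fun c => PySem.Chars.isIn [c] "0123456789abcdef".toList)
    | _ => false   -- unreachable: parts.length = 2 (Python tuple unpacking)

-- ===== PORT B =====
def looks_like_fingerprint_format_py_alt (dir_name : String) : Bool :=
  let s := dir_name.toList
  let n := s.length
  decide (9 ≤ n) &&
  (PySem.List.pyGet? s ((n : Int) - 9) == some '-') &&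
  !(PySem.Chars.isIn ['-'] (PySem.List.slice s none (some ((n : Int) - 9)))) &&
  (PySem.Chars.lower (PySem.List.slice s (some ((n : Int) - 8)) none)).all
    (fun c => PySem.Chars.isIn [c] "0123456789abcdef".toList)

-- ===== PRECONDITION & SPEC =====
def Spec_looks_like_fingerprint_format_py (dir_name : String) (out : Bool) : Prop := out = looks_like_fingerprint_format_py_alt dir_name
instance (dir_name : String) (out : Bool) : Decidable (Spec_looks_like_fingerprint_format_py dir_name out) := by unfold Spec_looks_like_fingerprint_format_py; infer_instance

-- ===== CLAIM (what is proved, stated in full; the proofs are below) =====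
def Claim_equal_looks_like_fingerprint_format_py : Prop := ∀ (dir_name : String), Dom_looks_like_fingerprint_format_py dir_name → Spec_looks_like_fingerprint_format_py dir_name (looks_like_fingerprint_format_py dir_name)

-- ===== LEMMAS AND PROOFS =====

-- Reference splitter for a single-character separator '-'.
def split1 : List Char → List (List Char)
  | [] => [[]]
  | c :: rest => if c = '-' then [] :: split1 rest else (split1 rest).modifyHead (c :: ·)

theorem split1_ne_nil (s : List Char) : split1 s ≠ [] := by
  induction s with
  | nil => simp [split1]
  | cons c rest ih =>
    simp only [split1]
    split_ifs with h
    · simp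
    · cases hr : split1 rest with
      | nil => exact absurd hr ih
      | cons a t => simp [List.modifyHead]

theorem go_eq (fuel : Nat) : ∀ (l cur : List Char) (acc : List (List Char)),
    l.length < fuel →
    PySem.Chars.splitOn.go ['-'] fuel l cur acc
      = acc.reverse ++ (split1 l).modifyHead (cur.reverse ++ ·) := by
  induction fuel with
  | zero => intro l cur acc h; omega
  | succ k ih =>
    intro l cur acc h
    cases l with
    | nil =>
      simp [PySem.Chars.splitOn.go, split1]
    | cons c rest =>
      by_cases hc : c = '-'
      · subst hc
        rw [PySem.Chars.splitOn.go]
        rw [if_pos (by simp [List.isPrefixOf])]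
        simp only [List.length_cons, List.length_nil, List.drop_succ_cons, List.drop_zero]
        rw [ih rest [] (cur.reverse :: acc) (by simp at h; omega)]
        simp only [split1, reduceIte]
        cases hr : split1 rest with
        | nil => exact absurd hr (split1_ne_nil rest)
        | cons a t => simp [List.modifyHead]
      · rw [PySem.Chars.splitOn.go]
        rw [if_neg (by simp [List.isPrefixOf]; exact fun hh => hc hh.symm)]
        rw [ih rest (c :: cur) acc (by simp at h; omega)]
        simp only [split1, if_neg hc]
        cases hr : split1 rest with
        | nil => exact absurd hr (split1_ne_nil rest)
        | cons a t => simp [List.modifyHead]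

theorem splitOn_eq_split1 (s : List Char) : PySem.Chars.splitOn s ['-'] = split1 s := by
  rw [PySem.Chars.splitOn, go_eq (s.length + 1) s [] [] (by omega)]
  cases hr : split1 s with
  | nil => exact absurd hr (split1_ne_nil s)
  | cons a t => simp [List.modifyHead]

theorem split1_no_dash {f : List Char} (h : '-' ∉ f) : split1 f = [f] := by
  induction f with
  | nil => simp [split1]
  | cons c rest ih =>
    simp only [List.mem_cons, not_or] at h
    simp [split1, Ne.symm h.1, ih h.2, List.modifyHead]

theorem split1_append {p : List Char} (f : List Char) (hp : '-' ∉ p) :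
    split1 (p ++ '-' :: f) = p :: split1 f := by
  induction p with
  | nil => simp [split1]
  | cons c rest ih =>
    simp only [List.mem_cons, not_or] at hp
    simp only [List.cons_append, split1, if_neg (Ne.symm hp.1), ih hp.2]
    cases hr : split1 f with
    | nil => exact absurd hr (split1_ne_nil f)
    | cons a t => simp [List.modifyHead]

theorem split1_eq_single {s x : List Char} (h : split1 s = [x]) : s = x ∧ '-' ∉ s := by
  induction s generalizing x with
  | nil => simp [split1] at h; subst h; simp
  | cons c rest ih =>
    simp only [split1] at h
    split_ifs at h with hc
    · cases hr : split1 rest with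
      | nil => exact absurd hr (split1_ne_nil rest)
      | cons a t => rw [hr] at h; simp at h
    · cases hr : split1 rest with
      | nil => exact absurd hr (split1_ne_nil rest)
      | cons a t =>
        rw [hr] at h
        simp only [List.modifyHead, List.cons.injEq] at h
        obtain ⟨h1, h2⟩ := h
        obtain ⟨hra, hnd⟩ := ih (hr.trans (by rw [h2]))
        subst h1
        exact ⟨by rw [hra], by simp [Ne.symm hc]; exact hnd⟩

theorem split1_eq_pair {s p f : List Char} (h : split1 s = [p, f]) :
    s = p ++ '-' :: f ∧ '-' ∉ p ∧ '-' ∉ f := by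
  induction s generalizing p with
  | nil => simp [split1] at h
  | cons c rest ih =>
    simp only [split1] at h
    split_ifs at h with hc
    · simp only [List.cons.injEq] at h
      obtain ⟨h1, h2⟩ := h
      obtain ⟨hrf, hnd⟩ := split1_eq_single h2
      subst hc h1 hrf
      exact ⟨rfl, by simp, hnd⟩
    · cases hr : split1 rest with
      | nil => exact absurd hr (split1_ne_nil rest)
      | cons a t =>
        rw [hr] at h
        simp only [List.modifyHead, List.cons.injEq] at h
        obtain ⟨h1, h2⟩ := h
        obtain ⟨hre, hnp, hnf⟩ := ih (hr.trans (by rw [h2]))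
        subst h1
        exact ⟨by rw [hre]; rfl, by simp [Ne.symm hc, hnp], hnf⟩

-- The shape both programs test for: one dash, 8 hex characters after it.
def FP (s : List Char) : Prop :=
  ∃ p f : List Char, s = p ++ '-' :: f ∧ '-' ∉ p ∧ '-' ∉ f ∧ f.length = 8 ∧
    ((PySem.Chars.lower f).all (fun c => PySem.Chars.isIn [c] "0123456789abcdef".toList)) = true

theorem hex_no_dash {f : List Char}
    (h : ((PySem.Chars.lower f).all (fun c => PySem.Chars.isIn [c] "0123456789abcdef".toList)) = true) :
    '-' ∉ f := by
  intro hm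
  have hmem : PySem.Chars.lowerChar '-' ∈ PySem.Chars.lower f := by
    simp only [PySem.Chars.lower]
    exact List.mem_map_of_mem hm
  have := (List.all_eq_true.mp h) _ hmem
  simp [PySem.Chars.lowerChar, PySem.Chars.isupper] at this
  exact absurd this (by decide)

theorem split1_of_FP {s p f : List Char}
    (hs : s = p ++ '-' :: f) (hp : '-' ∉ p) (hf : '-' ∉ f) : split1 s = [p, f] := by
  subst hs
  rw [split1_append f hp, split1_no_dash hf]

theorem a_iff (dir_name : String) :
    looks_like_fingerprint_format_py dir_name = true ↔ FP dir_name.toList := by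
  unfold looks_like_fingerprint_format_py
  rw [splitOn_eq_split1]
  rcases hsp : split1 dir_name.toList with _ | ⟨p, _ | ⟨f, _ | ⟨x, t⟩⟩⟩
  · exact absurd hsp (split1_ne_nil _)
  · simp only [List.length_singleton]
    constructor
    · intro h; simp at h
    · rintro ⟨p', f', hs, hp', hf', -, -⟩
      rw [split1_of_FP hs hp' hf'] at hsp; simp at hsp
  · rw [if_neg (by simp), Bool.and_eq_true, beq_iff_eq]
    constructor
    · rintro ⟨h8, hall⟩
      obtain ⟨hs, hp, hf⟩ := split1_eq_pair hsp
      exact ⟨p, f, hs, hp, hf, h8, hall⟩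
    · rintro ⟨p', f', hs, hp', hf', h8, hall⟩
      rw [split1_of_FP hs hp' hf'] at hsp
      simp only [List.cons.injEq] at hsp
      obtain ⟨rfl, rfl, -⟩ := hsp
      exact ⟨h8, hall⟩
  · constructor
    · intro h; simp at h
    · rintro ⟨p', f', hs, hp', hf', -, -⟩
      rw [split1_of_FP hs hp' hf'] at hsp; simp at hsp

theorem b_iff (dir_name : String) :
    looks_like_fingerprint_format_py_alt dir_name = true ↔ FP dir_name.toList := by
  unfold looks_like_fingerprint_format_py_alt
  simp only [Bool.and_eq_true, decide_eq_true_eq, beq_iff_eq, Bool.not_eq_eq_eq_not,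
    Bool.not_true]
  constructor
  · rintro ⟨⟨⟨h9, hget⟩, hni⟩, hall⟩
    set s := dir_name.toList with hsdef
    set n := s.length with hndef
    have hk : (n : Int) - 9 = ((n - 9 : Nat) : Int) := by omega
    have hk8 : (n : Int) - 8 = ((n - 8 : Nat) : Int) := by omega
    rw [hk, PySem.List.pyGet?_natCast] at hget
    rw [hk, PySem.List.slice_to_natCast] at hni
    rw [hk8, PySem.List.slice_from_natCast] at hall
    have hlt : n - 9 < n := by omega
    have hgetE : s[n - 9]'(hlt) = '-' := by
      have := List.getElem?_eq_getElem hlt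
      rw [hget] at this; simpa using this.symm
    refine ⟨s.take (n - 9), s.drop (n - 8), ?_, ?_, ?_, ?_, hall⟩
    · have hstep : s.drop (n - 9) = '-' :: s.drop (n - 8) := by
        rw [← List.getElem_cons_drop hlt, hgetE]
        have h98 : n - 9 + 1 = n - 8 := by omega
        rw [h98]
      conv_lhs => rw [← List.take_append_drop (n - 9) s, hstep]
    · intro hm
      have : PySem.Chars.isIn ['-'] (s.take (n - 9)) = true :=
        (PySem.Chars.isIn_iff_infix _ _).mpr ((List.singleton_infix_iff _ _).mpr hm)
      rw [hni] at this; exact absurd this (by decide)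
    · exact hex_no_dash hall
    · simp only [List.length_drop]; omega
  · rintro ⟨p, f, hs, hp, hf, h8, hall⟩
    have hn : dir_name.toList.length = p.length + 9 := by
      rw [hs]; simp [h8]
    have hk : (dir_name.toList.length : Int) - 9 = ((p.length : Nat) : Int) := by omega
    have hk8 : (dir_name.toList.length : Int) - 8 = ((p.length + 1 : Nat) : Int) := by omega
    refine ⟨⟨⟨by omega, ?_⟩, ?_⟩, ?_⟩
    · rw [hk, PySem.List.pyGet?_natCast, hs]
      rw [List.getElem?_append_right (by omega)]
      simp
    · rw [hk, PySem.List.slice_to_natCast, hs, List.take_left]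
      rw [← Bool.not_eq_true]
      intro hin
      exact absurd ((List.singleton_infix_iff _ _).mp ((PySem.Chars.isIn_iff_infix _ _).mp hin)) hp
    · rw [hk8, PySem.List.slice_from_natCast, hs,
        show p ++ '-' :: f = (p ++ ['-']) ++ f by simp,
        show p.length + 1 = (p ++ ['-']).length by simp,
        List.drop_left]
      exact hall

-- ===== VERDICT (by name: the statement is the Claim_ definition above) =====
theorem looks_like_fingerprint_format_py_spec : Claim_equal_looks_like_fingerprint_format_py := by
  intro dir_name _
  unfold Spec_looks_like_fingerprint_format_py
  rw [Bool.eq_iff_iff, a_iff, b_iff]
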